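-- pv_equiv track=rewrite | github.com/altron42/python | lista-1/parte-1/bloco3.py | maior_ponto
-- ===== SOURCE A (Python) =====
-- def carrocap(ponta):
-- 	if len(ponta)==1: return False
-- 	elif ponta[0]==ponta[1]: return True
-- 	else: return False
--
-- def pontuacao(mesa):
-- 	soma=0
-- 	for ponta in mesa:
-- 		soma=soma+ponta[0]
-- 		if len(ponta)>1: soma=soma+ponta[1]
-- 	return soma
--
-- def maior_ponto(pedra,mesa):
-- 	pontaA=pedra[0]
-- 	pontaB=pedra[1]
-- 	pontos=pontuacao(mesa)
-- 	maior=0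
-- 	maiorIndice=-1
-- 	indice=0
-- 	for ponta in mesa:
-- 		if not carrocap(pedra) and not carrocap(ponta):
-- 			if pontaA==ponta[0]:
-- 				if (pontos-ponta[0]+pontaB)%5==0 and (pontos-ponta[0]+pontaB)>maior:
-- 					maiorIndice=indice
-- 			elif pontaB==ponta[0]:
-- 				if (pontos-ponta[0]+pontaA)%5==0 and (pontos-ponta[0]+pontaA)>maior:
-- 					maiorIndice=indice
-- 		elif carrocap(pedra) and not carrocap(ponta):
-- 			if pontaA==ponta[0]:
-- 				if (pontos-ponta[0]+(2*pontaA))%5==0 and (pontos-ponta[0]+(2*pontaA))>maior: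
-- 					maiorIndice=indice
-- 		elif not carrocap(pedra) and carrocap(ponta):
-- 			if pontaA==ponta[0]:
-- 				if (pontos-(2*ponta[0])+pontaB)%5==0 and (pontos-(2*ponta[0])+pontaB)>maior:
-- 					maiorIndice=indice
-- 			elif pontaB==ponta[0]:
-- 				if (pontos-(2*ponta[0])+pontaA)%5==0 and (pontos-(2*ponta[0])+pontaA)>maior:
-- 					maiorIndice=indice
-- 		else:
-- 			if pontaA==ponta[0]:
-- 				if pontos%5==0 and pontos>maior:
-- 					maiorIndice=indice
-- 		indice=indice+1
-- 	return maiorIndice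
-- ===== SOURCE B (Python) =====
-- def _carro(p):
--     return len(p) != 1 and p[0] == p[1]
--
-- def maior_ponto(pedra, mesa):
--     a, b = pedra[0], pedra[1]
--     cp = _carro(pedra)
--     pontos = 0
--     for p in mesa:
--         pontos += p[0]
--         if len(p) > 1:
--             pontos += p[1]
--     for i, p in reversed(list(enumerate(mesa))):
--         if cp:
--             add = 2 * a if a == p[0] else None
--         else:
--             add = b if a == p[0] else (a if b == p[0] else None)
--         if add is not None:
--             cand = pontos - (2 * p[0] if _carro(p) else p[0]) + add
--             if cand % 5 == 0 and cand > 0: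
--                 return i
--     return -1
-- ===== Notes on version B (the rewrite author's own statement) =====
-- stated objective: simpler
-- what changed: Replaces A's four duplicated branch blocks (each repeating the score formula and the %5/positivity test) by one computed candidate (subtract the matched end, doubled for a carro ponta; add the free end, doubled for a carro pedra) with a single uniform test, and scans mesa in reverse returning the first qualifier instead of tracking the last match forward.
import Mathlib
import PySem

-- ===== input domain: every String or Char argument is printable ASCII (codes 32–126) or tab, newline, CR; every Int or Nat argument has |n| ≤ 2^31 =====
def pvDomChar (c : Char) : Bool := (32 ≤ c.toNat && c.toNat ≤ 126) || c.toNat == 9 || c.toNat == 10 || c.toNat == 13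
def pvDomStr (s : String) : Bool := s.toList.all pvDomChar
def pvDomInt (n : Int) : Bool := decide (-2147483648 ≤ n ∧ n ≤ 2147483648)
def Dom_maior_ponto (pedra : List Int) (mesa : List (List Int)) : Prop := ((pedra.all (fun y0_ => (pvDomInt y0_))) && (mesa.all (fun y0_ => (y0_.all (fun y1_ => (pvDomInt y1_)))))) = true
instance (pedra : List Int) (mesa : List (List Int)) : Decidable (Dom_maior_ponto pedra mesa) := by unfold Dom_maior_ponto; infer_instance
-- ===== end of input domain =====

-- B replaces A's four duplicated branch blocks by one computed candidate (subtract the matched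
-- end once, twice if that ponta is a carro; add the free end, doubled for a carro pedra) with a
-- single `%5 == 0 and > 0` test, scanning mesa in reverse and returning the first qualifier
-- (= A's last). Objective: simpler.

-- ===== PORT A =====
def carrocap (ponta : List Int) : Bool :=
  if ponta.length = 1 then false
  else if (PySem.List.pyGet? ponta 0).getD 0 = (PySem.List.pyGet? ponta 1).getD 0 then true
  else false

def pontuacao (mesa : List (List Int)) : Int :=
  mesa.foldl (fun soma ponta =>
    let soma := soma + (PySem.List.pyGet? ponta 0).getD 0
    if ponta.length > 1 then soma + (PySem.List.pyGet? ponta 1).getD 0 else soma) 0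

-- the literal loop body of A (state = (maiorIndice, indice); maior is the constant 0)
def stepA (pedra : List Int) (pontaA pontaB pontos : Int) (st : Int × Int)
    (ponta : List Int) : Int × Int :=
  let maiorIndice := st.1
  let indice := st.2
  let maior : Int := 0
  let p0 := (PySem.List.pyGet? ponta 0).getD 0
  let maiorIndice :=
    if ¬ carrocap pedra = true ∧ ¬ carrocap ponta = true then
      if pontaA = p0 then
        if PySem.Int.mod (pontos - p0 + pontaB) 5 = 0 ∧ pontos - p0 + pontaB > maior then
          indice else maiorIndice
      else if pontaB = p0 then
        if PySem.Int.mod (pontos - p0 + pontaA) 5 = 0 ∧ pontos - p0 + pontaA > maior then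
          indice else maiorIndice
      else maiorIndice
    else if carrocap pedra = true ∧ ¬ carrocap ponta = true then
      if pontaA = p0 then
        if PySem.Int.mod (pontos - p0 + 2 * pontaA) 5 = 0 ∧ pontos - p0 + 2 * pontaA > maior then
          indice else maiorIndice
      else maiorIndice
    else if ¬ carrocap pedra = true ∧ carrocap ponta = true then
      if pontaA = p0 then
        if PySem.Int.mod (pontos - 2 * p0 + pontaB) 5 = 0 ∧ pontos - 2 * p0 + pontaB > maior then
          indice else maiorIndice
      else if pontaB = p0 then
        if PySem.Int.mod (pontos - 2 * p0 + pontaA) 5 = 0 ∧ pontos - 2 * p0 + pontaA > maior then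
          indice else maiorIndice
      else maiorIndice
    else
      if pontaA = p0 then
        if PySem.Int.mod pontos 5 = 0 ∧ pontos > maior then indice else maiorIndice
      else maiorIndice
  (maiorIndice, indice + 1)

def maior_ponto (pedra : List Int) (mesa : List (List Int)) : Int :=
  let pontaA := (PySem.List.pyGet? pedra 0).getD 0
  let pontaB := (PySem.List.pyGet? pedra 1).getD 0
  let pontos := pontuacao mesa
  (mesa.foldl (stepA pedra pontaA pontaB pontos) (-1, 0)).1

-- ===== PORT B =====
def bCarro (p : List Int) : Bool :=
  ¬ p.length = 1 ∧ (PySem.List.pyGet? p 0).getD 0 = (PySem.List.pyGet? p 1).getD 0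

def bAdd (cp : Bool) (a b p0 : Int) : Option Int :=
  if cp then (if a = p0 then some (2 * a) else none)
  else if a = p0 then some b else if b = p0 then some a else none

def bScan (cp : Bool) (a b pontos : Int) : List (Int × List Int) → Int
  | [] => -1
  | (i, p) :: rest =>
    let p0 := (PySem.List.pyGet? p 0).getD 0
    match bAdd cp a b p0 with
    | some add =>
      let cand := pontos - (if bCarro p then 2 * p0 else p0) + add
      if PySem.Int.mod cand 5 = 0 ∧ cand > 0 then i else bScan cp a b pontos rest
    | none => bScan cp a b pontos rest

def maior_ponto_alt (pedra : List Int) (mesa : List (List Int)) : Int :=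
  let a := (PySem.List.pyGet? pedra 0).getD 0
  let b := (PySem.List.pyGet? pedra 1).getD 0
  let cp := bCarro pedra
  let pontos := mesa.foldl (fun s p =>
    let s := s + (PySem.List.pyGet? p 0).getD 0
    if p.length > 1 then s + (PySem.List.pyGet? p 1).getD 0 else s) 0
  bScan cp a b pontos (PySem.List.enumerate mesa).reverse

-- ===== PRECONDITION & SPEC =====
-- Pre_ excludes exactly the inputs where Python A raises IndexError: pedra needs two ends
-- (pedra[0], pedra[1]) and every ponta on mesa must be nonempty (ponta[0]).
def Pre_maior_ponto (pedra : List Int) (mesa : List (List Int)) : Prop :=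
  2 ≤ pedra.length ∧ ∀ p ∈ mesa, p ≠ []
instance (pedra : List Int) (mesa : List (List Int)) : Decidable (Pre_maior_ponto pedra mesa) := by
  unfold Pre_maior_ponto; infer_instance

def pvWitness_maior_ponto : List Int × List (List Int) := ([2, 3], [[2, 1], [5, 5], [3]])

def Spec_maior_ponto (pedra : List Int) (mesa : List (List Int)) (out : Int) : Prop := out = maior_ponto_alt pedra mesa
instance (pedra : List Int) (mesa : List (List Int)) (out : Int) : Decidable (Spec_maior_ponto pedra mesa out) := by unfold Spec_maior_ponto; infer_instance

-- ===== CLAIM (what is proved, stated in full; the proofs are below) =====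
def Claim_equal_maior_ponto : Prop := ∀ (pedra : List Int) (mesa : List (List Int)), Dom_maior_ponto pedra mesa → Pre_maior_ponto pedra mesa → Spec_maior_ponto pedra mesa (maior_ponto pedra mesa)

-- ===== LEMMAS AND PROOFS =====

-- the boolean "this ponta fires" condition of B's scan
def fireB (cp : Bool) (a b pontos : Int) (p : List Int) : Bool :=
  let p0 := (PySem.List.pyGet? p 0).getD 0
  match bAdd cp a b p0 with
  | some add =>
    let cand := pontos - (if bCarro p then 2 * p0 else p0) + add
    decide (PySem.Int.mod cand 5 = 0 ∧ cand > 0)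
  | none => false

lemma carrocap_eq (p : List Int) : carrocap p = bCarro p := by
  simp [carrocap, bCarro]

lemma bScan_cons (cp : Bool) (a b pontos i : Int) (p : List Int) (rest : List (Int × List Int)) :
    bScan cp a b pontos ((i, p) :: rest) =
      if fireB cp a b pontos p then i else bScan cp a b pontos rest := by
  cases hb : bAdd cp a b ((PySem.List.pyGet? p 0).getD 0) <;>
    simp [bScan, fireB, hb]

-- A's branchy loop body is B's single computed test
lemma stepA_eq (pedra p : List Int) (a b pontos mi ind : Int) :
    stepA pedra a b pontos (mi, ind) p =
      (if fireB (bCarro pedra) a b pontos p then ind else mi, ind + 1) := by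
  by_cases hcp : bCarro pedra = true <;>
    by_cases hc : bCarro p = true <;>
    by_cases h1 : a = (PySem.List.pyGet? p 0).getD 0 <;>
    by_cases h2 : b = (PySem.List.pyGet? p 0).getD 0 <;>
    simp [stepA, fireB, bAdd, carrocap_eq, hcp, hc, h1, h2]

lemma bScan_append_last (cp : Bool) (a b pontos : Int) (ys : List (Int × List Int))
    (n : Int) (x : List Int) :
    bScan cp a b pontos (ys ++ [(n, x)]) =
      if fireB cp a b pontos x then
        (if (ys.any (fun z => fireB cp a b pontos z.2)) then bScan cp a b pontos ys else n)
      else bScan cp a b pontos ys := by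
  induction ys with
  | nil => simp [bScan_cons, bScan]
  | cons z ys ih =>
    obtain ⟨i, p⟩ := z
    simp only [List.cons_append, bScan_cons, ih, List.any_cons]
    cases hz : fireB cp a b pontos p <;>
      cases hx : fireB cp a b pontos x <;> simp [hz, hx] <;> rw [Bool.false_or]

lemma bScan_none (cp : Bool) (a b pontos : Int) (ws : List (Int × List Int))
    (h : ∀ z ∈ ws, ¬ fireB cp a b pontos z.2 = true) : bScan cp a b pontos ws = -1 := by
  induction ws with
  | nil => rfl
  | cons w ws ih =>
    obtain ⟨i, p⟩ := w
    rw [bScan_cons, if_neg (h (i, p) (by simp))]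
    exact ih fun z hz => h z (by simp [hz])

-- main loop invariant: A's forward fold from index n with accumulator mi equals B's
-- reverse scan of the enumeration from n, with mi as the no-match fallback
lemma loop_eq (pedra : List Int) (a b pontos : Int) (l : List (List Int)) :
    ∀ (n mi : Int),
      (l.foldl (stepA pedra a b pontos) (mi, n)).1 =
        (if (PySem.List.enumerate l n).any
              (fun z => fireB (bCarro pedra) a b pontos z.2) then
          bScan (bCarro pedra) a b pontos (PySem.List.enumerate l n).reverse
        else mi) := by
  induction l with
  | nil => intro n mi; simp [PySem.List.enumerate_nil]
  | cons x l ih =>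
    intro n mi
    rw [PySem.List.enumerate_cons]
    simp only [List.foldl_cons, stepA_eq, ih, List.reverse_cons, List.any_cons,
      bScan_append_last]
    by_cases hx : fireB (bCarro pedra) a b pontos x <;>
      by_cases hl : (PySem.List.enumerate l (n + 1)).any
          (fun z => fireB (bCarro pedra) a b pontos z.2) = true <;>
      simp [hx, hl]

-- ===== VERDICT (by name: the statement is the Claim_ definition above) =====
theorem maior_ponto_spec : Claim_equal_maior_ponto := by
  intro pedra mesa _ _
  show maior_ponto pedra mesa = maior_ponto_alt pedra mesa
  simp only [maior_ponto, maior_ponto_alt, pontuacao]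
  rw [loop_eq]
  split <;> rename_i h
  · rfl
  · -- no ponta fires: B's reverse scan also returns -1
    rw [bScan_none]
    intro z hz
    simp only [List.any_eq_true, not_exists, not_and] at h
    exact fun hf => h z (List.mem_reverse.mp hz) hf
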